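-- pv_equiv track=rewrite | github.com/areiljan/Python | KT/kt3/exam.py | only_one_pair
-- ===== SOURCE A (Python) =====
-- def only_one_pair(numbers: list) -> bool:
--     """
--     Whether the list only has one pair.
--
--     Function returns True, if the list only has one pair (two elements have the same value).
--     In other cases:
--      there are no elements with the same value
--      there are more than 2 elements with the same value
--      there are several pairs
--     returns False.
--
--     only_one_pair([1, 2, 3]) => False
--     only_one_pair([1]) => False
--     only_one_pair([1, 2, 3, 1]) => True
--     only_one_pair([1, 2, 1, 3, 1]) => False
--     only_one_pair([1, 2, 1, 3, 1, 2]) => False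
--     """
--     pair_count = 0
--     for a in numbers:
--         count = numbers.count(a)
--         if count == 2:
--             pair_count += 1
--
--         if count >= 3:
--             return False
--
--     if pair_count == 2:
--         return True
--     else:
--         return False
-- ===== SOURCE B (Python) =====
-- def only_one_pair(numbers: list) -> bool:
--     counts = {}
--     for a in numbers:
--         counts[a] = counts.get(a, 0) + 1
--     pairs = 0
--     for c in counts.values():
--         if c >= 3:
--             return False
--         if c == 2:
--             pairs += 1
--     return pairs == 1
-- ===== Notes on version B (the rewrite author's own statement) =====
-- stated objective: faster
-- what changed: B builds a value->count dictionary in one pass and then scans the distinct counts once (pairs == 1), instead of A's per-element full-list .count scan (pair_count == 2).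
import Mathlib
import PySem

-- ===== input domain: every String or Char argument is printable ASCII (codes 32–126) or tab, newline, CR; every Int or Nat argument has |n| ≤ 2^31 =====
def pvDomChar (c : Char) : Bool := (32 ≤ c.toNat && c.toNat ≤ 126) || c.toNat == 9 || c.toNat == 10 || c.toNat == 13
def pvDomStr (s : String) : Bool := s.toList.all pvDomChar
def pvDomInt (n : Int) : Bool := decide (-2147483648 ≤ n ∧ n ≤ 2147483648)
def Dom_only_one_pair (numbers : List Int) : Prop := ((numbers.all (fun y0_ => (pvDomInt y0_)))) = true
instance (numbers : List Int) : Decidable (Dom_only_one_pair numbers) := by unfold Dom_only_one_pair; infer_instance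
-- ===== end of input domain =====

-- B replaces A's quadratic per-element .count scan by a counting dictionary built in one pass.

-- ===== PORT A =====
-- the 'for a in numbers' loop: pc is pair_count; early 'return False' on count >= 3
def only_one_pair_go (numbers : List Int) : List Int → Int → Bool
  | [], pc => pc == 2
  | a :: t, pc =>
      let c : Int := PySem.List.count numbers a
      let pc' : Int := if c == 2 then pc + 1 else pc
      if 3 ≤ c then false else only_one_pair_go numbers t pc'

def only_one_pair (numbers : List Int) : Bool :=
  only_one_pair_go numbers numbers 0

-- ===== PORT B =====
-- the 'for c in counts.values()' loop with early 'return False'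
def only_one_pair_alt_go : List Int → Int → Bool
  | [], pairs => pairs == 1
  | c :: t, pairs =>
      if 3 ≤ c then false
      else only_one_pair_alt_go t (if c == 2 then pairs + 1 else pairs)

def only_one_pair_alt (numbers : List Int) : Bool :=
  let counts : PySem.Dict Int Int :=
    numbers.foldl (fun d a => d.insert a (d.getD a 0 + 1)) PySem.Dict.empty
  only_one_pair_alt_go counts.values 0

-- ===== PRECONDITION & SPEC =====
def Spec_only_one_pair (numbers : List Int) (out : Bool) : Prop := out = only_one_pair_alt numbers
instance (numbers : List Int) (out : Bool) : Decidable (Spec_only_one_pair numbers out) := by unfold Spec_only_one_pair; infer_instance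

-- ===== CLAIM (what is proved, stated in full; the proofs are below) =====
def Claim_equal_only_one_pair : Prop := ∀ (numbers : List Int), Dom_only_one_pair numbers → Spec_only_one_pair numbers (only_one_pair numbers)

-- ===== LEMMAS AND PROOFS =====

theorem goA_char (l : List Int) : ∀ (todo : List Int) (pc : Int),
    only_one_pair_go l todo pc =
      if todo.any (fun a => 3 ≤ l.count a) then false
      else decide (pc + (todo.countP (fun a => l.count a == 2) : Int) = 2) := by
  intro todo
  induction todo with
  | nil =>
    intro pc
    simp only [only_one_pair_go, List.any_nil, Bool.false_eq_true, if_false, List.countP_nil,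
      Nat.cast_zero, add_zero]
    rw [Bool.eq_iff_iff]; simp
  | cons a t ih =>
    intro pc
    show (if (3:Int) ≤ (PySem.List.count l a : Int) then false
          else only_one_pair_go l t
            (if ((PySem.List.count l a : Int) == 2) then pc + 1 else pc)) = _
    rw [PySem.List.count_eq]
    by_cases h3 : 3 ≤ l.count a
    · rw [if_pos (by exact_mod_cast h3)]
      simp [h3]
    · rw [if_neg (by exact_mod_cast h3), ih, List.any_cons]
      have h3d : decide (3 ≤ l.count a) = false := by simpa using h3
      rw [h3d, Bool.false_or]
      cases ht : t.any (fun a => 3 ≤ l.count a) with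
      | true => simp [ht]
      | false =>
        simp only [Bool.false_eq_true, if_false, List.countP_cons]
        rw [Bool.eq_iff_iff]
        simp only [decide_eq_true_eq]
        by_cases h2 : List.count a l = 2
        · rw [if_pos (show (((List.count a l : Int)) == 2) = true by
                simp only [beq_iff_eq]; exact_mod_cast h2),
              if_pos (show (List.count a l == 2) = true by simp [h2])]
          push_cast
          omega
        · rw [if_neg (show ¬ ((((List.count a l : Int)) == 2) = true) by
                simp only [beq_iff_eq]; exact_mod_cast h2),
              if_neg (show ¬ ((List.count a l == 2) = true) by simp [h2])]
          push_cast
          omega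

theorem goB_char : ∀ (vs : List Int) (pairs : Int),
    only_one_pair_alt_go vs pairs =
      if vs.any (fun c => 3 ≤ c) then false
      else decide (pairs + (vs.countP (fun c => c == 2) : Int) = 1) := by
  intro vs
  induction vs with
  | nil =>
    intro pairs
    simp only [only_one_pair_alt_go, List.any_nil, Bool.false_eq_true, if_false, List.countP_nil,
      Nat.cast_zero, add_zero]
    rw [Bool.eq_iff_iff]; simp
  | cons c t ih =>
    intro pairs
    show (if (3:Int) ≤ c then false
          else only_one_pair_alt_go t (if (c == 2) then pairs + 1 else pairs)) = _
    by_cases h3 : (3:Int) ≤ c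
    · rw [if_pos h3]
      simp [h3]
    · rw [if_neg h3, ih, List.any_cons]
      have h3d : decide ((3:Int) ≤ c) = false := by simpa using h3
      rw [h3d, Bool.false_or]
      cases ht : t.any (fun c => (3:Int) ≤ c) with
      | true => simp [ht]
      | false =>
        simp only [Bool.false_eq_true, if_false, List.countP_cons]
        rw [Bool.eq_iff_iff]
        simp only [decide_eq_true_eq]
        by_cases h2 : c = (2:Int)
        · rw [if_pos (show ((c == (2:Int)) = true) by simp [h2]),
              if_pos (show (c == (2:Int)) = true by simp [h2])]
          push_cast
          omega
        · rw [if_neg (show ¬ ((c == (2:Int)) = true) by simp [h2]),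
              if_neg (show ¬ ((c == (2:Int)) = true) by simp [h2])]
          push_cast
          omega

-- elements with count n come n at a time: full-list countP = n * distinct-values countP
theorem countP_count_mul (l s : List Int) (n : Nat) (hnd : s.Nodup)
    (hmem : ∀ x, x ∈ s ↔ x ∈ l) :
    l.countP (fun a => l.count a == n) = n * s.countP (fun k => l.count k == n) := by
  classical
  have hsf : s.toFinset = l.toFinset := by
    ext x; simp [List.mem_toFinset, hmem x]
  have hLHS : l.countP (fun a => l.count a == n)
      = ∑ v ∈ l.toFinset.filter (fun v => l.count v == n), l.count v := by
    rw [List.countP_eq_length_filter]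
    have hms := Multiset.toFinset_sum_count_eq (↑(l.filter (fun a => l.count a == n)) : Multiset Int)
    simp only [List.toFinset_coe, Multiset.coe_count, Multiset.coe_card] at hms
    rw [← hms, List.toFinset_filter]
    apply Finset.sum_congr rfl
    intro v hv
    rw [List.count_filter]
    simp only [Finset.mem_filter] at hv
    simp [hv.2]
  have hRHS : s.countP (fun k => l.count k == n)
      = (l.toFinset.filter (fun v => l.count v == n)).card := by
    rw [List.countP_eq_length_filter,
      ← List.toFinset_card_of_nodup (hnd.filter _), List.toFinset_filter, hsf]
  rw [hLHS, hRHS]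
  rw [Finset.sum_congr rfl (fun v hv => by
    simp only [Finset.mem_filter, beq_iff_eq] at hv; exact hv.2)]
  rw [Finset.sum_const, smul_eq_mul, Nat.mul_comm]

-- ===== VERDICT (by name: the statement is the Claim_ definition above) =====
theorem only_one_pair_spec : Claim_equal_only_one_pair := by
  intro l _hdom
  show only_one_pair l = only_one_pair_alt l
  simp only [only_one_pair, only_one_pair_alt]
  rw [goA_char, goB_char]
  have hv : (List.foldl (fun d a => d.insert a (d.getD a 0 + 1)) PySem.Dict.empty l).values
      = (PySem.Set.ofList l).map (fun k => (l.count k : Int)) := by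
    rw [PySem.Dict.foldl_insert_getD_add_one_eq_counter]
    simp only [PySem.Dict.values, PySem.Dict.items_counter, List.map_map]
    rfl
  rw [hv]
  have hany : ((PySem.Set.ofList l).map (fun k => (l.count k : Int))).any (fun c => 3 ≤ c)
      = l.any (fun a => 3 ≤ l.count a) := by
    rw [Bool.eq_iff_iff]
    simp only [List.any_map, List.any_eq_true, Function.comp]
    constructor
    · rintro ⟨x, hx, h3⟩
      exact ⟨x, (PySem.Set.mem_ofList _ _).1 hx, by simpa using h3⟩
    · rintro ⟨x, hx, h3⟩
      exact ⟨x, (PySem.Set.mem_ofList _ _).2 hx, by simpa using h3⟩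
  rw [hany]
  cases hA : l.any (fun a => 3 ≤ l.count a) with
  | true => simp
  | false =>
    simp only [Bool.false_eq_true, if_false]
    have hcp : ((PySem.Set.ofList l).map (fun k => (l.count k : Int))).countP (fun c => c == 2)
        = (PySem.Set.ofList l).countP (fun k => l.count k == 2) := by
      rw [List.countP_map]
      apply List.countP_congr
      intro k _
      rw [Bool.eq_iff_iff]
      simp only [Function.comp, beq_iff_eq]
      norm_cast
      tauto
    have hmul := countP_count_mul l (PySem.Set.ofList l) 2 (PySem.Set.nodup_ofList l)
      (fun x => PySem.Set.mem_ofList _ _)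
    rw [Bool.eq_iff_iff]
    simp only [decide_eq_true_eq, hcp]
    rw [hmul]
    push_cast
    omega
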